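-- pv_equiv track=rewrite | github.com/ag-din/DungAF | Dung/Dung.py | compute_acceptability
-- ===== SOURCE A (Python) =====
-- def get_arg_attackers(arg, attacks):
-- 	"""
-- 	Given an argument "arg" and the attack relations "attacks" return a set
-- 	of arguments that attacks "arg".
--
-- 	Parameters
-- 	----------
-- 	arg (str or int): An argument
-- 	attacks (list of 2-uples): Attack relations
--
-- 	Returns
-- 	-------
-- 	Set: Set of arguments that attacks "arg".
--
-- 	"""
-- 	attackers = set()
-- 	for i in attacks:
-- 		if i[1] == arg:
-- 			attackers.add(i[0])
-- 	return attackers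
--
-- def compute_acceptability(arg, E, relations):
-- 	"""
-- 	Return if the argument "arg" is acceptable or not respect the set of
-- 	arguments "E".
--
-- 	An argument "arg" in AF is ACCEPTABLE with respect to "E"
-- 	(subset de AF) if and only if "E" defends "arg", that is, forall "b" in AF
-- 	such that (b,arg) in R, exists c in E such that (c,b) in R.
--
-- 	Parameters
-- 	----------
-- 	arg (str or int): An argument
-- 	E (set): A set of arguments
-- 	relations (list of 2-uples): Attack relations
--
-- 	Returns
-- 	-------
-- 	Bool: if the argument "arg" is acceptable or not respect the set of
-- 	arguments "E".
--
-- 	"""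
-- 	attackers = get_arg_attackers(arg, relations)
-- 	if attackers != None:
-- 		atks = []
-- 		for y in attackers:
-- 			yStatus = False
-- 			yAtackers = get_arg_attackers(y, relations)
-- 			if len(yAtackers.intersection(E)) > 0:
-- 				yStatus = True
-- 			atks.append(yStatus)
-- 		if all(atks):
-- 			return True
-- 		else:
-- 			return False
-- ===== SOURCE B (Python) =====
-- def compute_acceptability(arg, E, relations):
--     E_set = set(E)
--     attacked_by_E = {b for (c, b) in relations if c in E_set}
--     attackers = {a for (a, b) in relations if b == arg}
--     return attackers.issubset(attacked_by_E)
-- ===== Notes on version B (the rewrite author's own statement) =====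
-- stated objective: alternative
-- what changed: B builds the set of arguments attacked by E in one pass over relations and decides defence by a single subset test, instead of re-scanning relations once per attacker of arg.
import Mathlib
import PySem

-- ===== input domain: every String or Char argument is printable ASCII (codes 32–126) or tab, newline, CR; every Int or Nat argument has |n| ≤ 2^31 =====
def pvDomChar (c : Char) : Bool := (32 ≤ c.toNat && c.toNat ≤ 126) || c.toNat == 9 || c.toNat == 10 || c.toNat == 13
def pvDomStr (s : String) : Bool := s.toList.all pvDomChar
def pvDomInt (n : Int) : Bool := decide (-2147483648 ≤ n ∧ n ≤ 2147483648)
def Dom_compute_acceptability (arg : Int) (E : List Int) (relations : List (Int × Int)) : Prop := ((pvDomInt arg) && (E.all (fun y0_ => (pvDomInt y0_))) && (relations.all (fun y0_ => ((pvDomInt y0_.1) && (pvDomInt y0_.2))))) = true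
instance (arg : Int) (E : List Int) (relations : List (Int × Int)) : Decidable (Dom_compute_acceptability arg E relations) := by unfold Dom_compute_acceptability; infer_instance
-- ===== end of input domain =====

-- B replaces A's per-attacker rescan of relations by one pass building the set of
-- arguments attacked by E, followed by a single subset test (objective: alternative).
-- A iterates over a Python set in hash order, but only to 'all' a list of booleans,
-- so the result is order-independent and the port folds over the PySem.Set list.

-- ===== PORT A =====
def get_arg_attackers (arg : Int) (attacks : List (Int × Int)) : PySem.Set Int :=
  attacks.foldl (fun attackers i => if i.2 == arg then PySem.Set.add attackers i.1 else attackers) PySem.Set.empty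

def compute_acceptability (arg : Int) (E : List Int) (relations : List (Int × Int)) : Bool :=
  let attackers := get_arg_attackers arg relations
  let atks : List Bool := attackers.foldl (fun atks y =>
      let yStatus := false
      let yAtackers := get_arg_attackers y relations
      let yStatus := if PySem.Set.len (PySem.Set.inter yAtackers E) > 0 then true else yStatus
      atks ++ [yStatus]) []
  if atks.all id then true else false

-- ===== PORT B =====
def compute_acceptability_alt (arg : Int) (E : List Int) (relations : List (Int × Int)) : Bool :=
  let eSet := PySem.Set.ofList E
  let attackedByE := PySem.Set.ofList ((relations.filter (fun p => PySem.Set.contains eSet p.1)).map (fun p => p.2))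
  let attackers := PySem.Set.ofList ((relations.filter (fun p => p.2 == arg)).map (fun p => p.1))
  PySem.Set.issubset attackers attackedByE

-- ===== PRECONDITION & SPEC =====
def Spec_compute_acceptability (arg : Int) (E : List Int) (relations : List (Int × Int)) (out : Bool) : Prop := out = compute_acceptability_alt arg E relations
instance (arg : Int) (E : List Int) (relations : List (Int × Int)) (out : Bool) : Decidable (Spec_compute_acceptability arg E relations out) := by unfold Spec_compute_acceptability; infer_instance

-- ===== CLAIM (what is proved, stated in full; the proofs are below) =====
def Claim_equal_compute_acceptability : Prop := ∀ (arg : Int) (E : List Int) (relations : List (Int × Int)), Dom_compute_acceptability arg E relations → Spec_compute_acceptability arg E relations (compute_acceptability arg E relations)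

-- ===== LEMMAS AND PROOFS =====

theorem mem_gaa_aux (arg x : Int) (rel : List (Int × Int)) :
    ∀ s : PySem.Set Int,
      (x ∈ rel.foldl (fun attackers i => if i.2 == arg then PySem.Set.add attackers i.1 else attackers) s
        ↔ x ∈ s ∨ (x, arg) ∈ rel) := by
  induction rel with
  | nil => intro s; simp [List.foldl]
  | cons p rest ih =>
    intro s
    simp only [List.foldl_cons]
    by_cases h : p.2 = arg
    · have hb : (p.2 == arg) = true := by simpa using h
      simp only [hb, if_true, ih, PySem.Set.mem_add, List.mem_cons]
      constructor
      · rintro ((hs | hx) | hr)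
        · exact Or.inl hs
        · exact Or.inr (Or.inl (by rw [hx, ← h]))
        · exact Or.inr (Or.inr hr)
      · rintro (hs | hp | hr)
        · exact Or.inl (Or.inl hs)
        · exact Or.inl (Or.inr (congrArg Prod.fst hp))
        · exact Or.inr hr
    · have hb : (p.2 == arg) = false := by simpa using h
      simp only [hb, Bool.false_eq_true, if_false, ih, List.mem_cons]
      constructor
      · rintro (hs | hr)
        · exact Or.inl hs
        · exact Or.inr (Or.inr hr)
      · rintro (hs | hp | hr)
        · exact Or.inl hs
        · exact (h ((congrArg Prod.snd hp).symm)).elim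
        · exact Or.inr hr

theorem mem_gaa (arg x : Int) (rel : List (Int × Int)) :
    x ∈ get_arg_attackers arg rel ↔ (x, arg) ∈ rel := by
  have := mem_gaa_aux arg x rel PySem.Set.empty
  simpa [get_arg_attackers, PySem.Set.empty] using this

theorem foldl_append_all (f : Int → Bool) (l : List Int) :
    ∀ acc : List Bool, (l.foldl (fun a y => a ++ [f y]) acc).all id = (acc.all id && l.all f) := by
  induction l with
  | nil => intro acc; simp
  | cons x xs ih =>
    intro acc
    simp only [List.foldl_cons, ih, List.all_cons, List.all_append]
    simp [Bool.and_assoc]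

theorem A_char (arg : Int) (E : List Int) (relations : List (Int × Int)) :
    compute_acceptability arg E relations = true ↔
      ∀ y, (y, arg) ∈ relations → ∃ c, (c, y) ∈ relations ∧ c ∈ E := by
  have key : (∀ x ∈ get_arg_attackers arg relations,
      (0 : Int) < (List.length (PySem.Set.inter (get_arg_attackers x relations) E) : Int)) ↔
      (∀ y, (y, arg) ∈ relations → ∃ c, (c, y) ∈ relations ∧ c ∈ E) := by
    constructor
    · intro h y hy
      have hp := h y ((mem_gaa arg y relations).2 hy)
      rw [Int.natCast_pos] at hp
      rcases List.exists_mem_of_length_pos hp with ⟨c, hc⟩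
      rw [PySem.Set.mem_inter] at hc
      exact ⟨c, (mem_gaa y c relations).1 hc.1, hc.2⟩
    · intro h y hy
      obtain ⟨c, hc1, hc2⟩ := h y ((mem_gaa arg y relations).1 hy)
      have hcm : c ∈ PySem.Set.inter (get_arg_attackers y relations) E :=
        (PySem.Set.mem_inter _ _ _).2 ⟨(mem_gaa y c relations).2 hc1, hc2⟩
      rw [Int.natCast_pos]
      exact List.length_pos_of_mem hcm
  unfold compute_acceptability
  rw [show (fun (atks : List Bool) (y : Int) =>
        let yStatus := false
        let yAtackers := get_arg_attackers y relations
        let yStatus := if PySem.Set.len (PySem.Set.inter yAtackers E) > 0 then true else yStatus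
        atks ++ [yStatus]) =
      (fun (atks : List Bool) (y : Int) => atks ++
        [decide (PySem.Set.len (PySem.Set.inter (get_arg_attackers y relations) E) > 0)]) from by
    funext atks y
    by_cases h : PySem.Set.len (PySem.Set.inter (get_arg_attackers y relations) E) > 0
    · simp only [h, if_true]
      simp [h]
    · simp only [h, if_false]
      simp [h]]
  simp only [foldl_append_all]
  simp only [List.all_nil, Bool.true_and, List.all_eq_true, decide_eq_true_eq, PySem.Set.len,
    gt_iff_lt]
  split_ifs with hall
  · simp only [true_iff]
    exact key.1 hall
  · simp only [false_iff]
    intro hq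
    exact hall (key.2 hq)

theorem B_char (arg : Int) (E : List Int) (relations : List (Int × Int)) :
    compute_acceptability_alt arg E relations = true ↔
      ∀ y, (y, arg) ∈ relations → ∃ c, (c, y) ∈ relations ∧ c ∈ E := by
  unfold compute_acceptability_alt
  simp only [PySem.Set.issubset_iff, PySem.Set.mem_ofList, List.mem_map, List.mem_filter]
  constructor
  · intro h y hy
    obtain ⟨p, ⟨hp, hpc⟩, hp2⟩ := h y ⟨(y, arg), ⟨hy, by simp⟩, rfl⟩
    rw [PySem.Set.contains_iff, PySem.Set.mem_ofList] at hpc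
    exact ⟨p.1, by rwa [show (p.1, y) = p from by cases p; simp_all], hpc⟩
  · intro h a ha
    obtain ⟨p, ⟨hp, hpa⟩, rfl⟩ := ha
    obtain ⟨c, hc1, hc2⟩ := h p.1 (by rwa [show (p.1, arg) = p from by cases p; simp_all])
    exact ⟨(c, p.1), ⟨hc1, by simp [PySem.Set.mem_ofList, hc2]⟩, rfl⟩

-- ===== VERDICT (by name: the statement is the Claim_ definition above) =====
theorem compute_acceptability_spec : Claim_equal_compute_acceptability := by
  intro arg E relations _
  unfold Spec_compute_acceptability
  rw [Bool.eq_iff_iff, A_char, B_char]
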